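-- pv_equiv track=rewrite | github.com/jimmyIn2011/Python-Algorithm-Exercise | broken_button.py | broken_button
-- ===== SOURCE A (Python) =====
-- def broken_button(s):
--     arr = []
--     flip = False
--     for i in s:
--         if i == "i":
--             flip = not flip
--         elif flip:
--             arr = arr[::-1]
--         else:
--             arr.append(i)
--     if flip:
--         arr = arr[::-1]
--     return "".join(arr)
-- ===== SOURCE B (Python) =====
-- def broken_button(s):
--     # Two-stack deque with an orientation flag: a "reversal" just toggles the
--     # flag, and a new char is pushed onto whichever stack is the current back.
--     left = []   # chars at the physical front, stored last-first
--     right = []  # chars at the physical back, in order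
--     rev = False
--     flip = False
--     for c in s:
--         if c == "i":
--             flip = not flip
--         elif flip:
--             rev = not rev
--         elif rev:
--             left.append(c)
--         else:
--             right.append(c)
--     if flip:
--         rev = not rev
--     if rev:
--         return "".join(right[::-1] + left)
--     return "".join(left[::-1] + right)
-- ===== Notes on version B (the rewrite author's own statement) =====
-- stated objective: alternative
-- what changed: Replaces the physical list reversal per trigger char with an O(1) orientation toggle over a two-stack deque, appending each char to the current back stack and assembling the string once at the end.
import Mathlib
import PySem

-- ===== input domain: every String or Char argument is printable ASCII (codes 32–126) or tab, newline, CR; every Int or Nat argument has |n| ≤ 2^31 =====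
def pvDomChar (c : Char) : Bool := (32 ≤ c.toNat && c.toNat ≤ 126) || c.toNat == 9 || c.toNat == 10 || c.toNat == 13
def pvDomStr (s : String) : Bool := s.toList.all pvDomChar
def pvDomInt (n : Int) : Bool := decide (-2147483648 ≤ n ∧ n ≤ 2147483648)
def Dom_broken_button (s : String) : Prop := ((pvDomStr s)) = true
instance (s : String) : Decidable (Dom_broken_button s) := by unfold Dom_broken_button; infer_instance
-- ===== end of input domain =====

-- B replaces A's physical list reversal per trigger char by an O(1) orientation
-- toggle over a two-stack deque (objective: alternative algorithm, same result).


-- ===== PORT A =====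
-- state: (arr, flip)
def bbStepA (st : List Char × Bool) (c : Char) : List Char × Bool :=
  if c = 'i' then (st.1, !st.2)
  else if st.2 then (st.1.reverse, st.2)
  else (st.1 ++ [c], st.2)

def broken_button (s : String) : String :=
  let st := s.toList.foldl bbStepA ([], false)
  String.mk (if st.2 then st.1.reverse else st.1)

-- ===== PORT B =====
-- state: (left, right, rev, flip); left holds the physical front last-first
def bbStepB (st : List Char × List Char × Bool × Bool) (c : Char) :
    List Char × List Char × Bool × Bool :=
  if c = 'i' then (st.1, st.2.1, st.2.2.1, !st.2.2.2)
  else if st.2.2.2 then (st.1, st.2.1, !st.2.2.1, st.2.2.2)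
  else if st.2.2.1 then (st.1 ++ [c], st.2.1, st.2.2.1, st.2.2.2)
  else (st.1, st.2.1 ++ [c], st.2.2.1, st.2.2.2)

def broken_button_alt (s : String) : String :=
  let st := s.toList.foldl bbStepB ([], [], false, false)
  let rev := if st.2.2.2 then !st.2.2.1 else st.2.2.1
  String.mk (if rev then st.2.1.reverse ++ st.1 else st.1.reverse ++ st.2.1)

-- ===== PRECONDITION & SPEC =====
def Spec_broken_button (s : String) (out : String) : Prop := out = broken_button_alt s
instance (s : String) (out : String) : Decidable (Spec_broken_button s out) := by unfold Spec_broken_button; infer_instance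

-- ===== CLAIM (what is proved, stated in full; the proofs are below) =====
def Claim_equal_broken_button : Prop := ∀ (s : String), Dom_broken_button s → Spec_broken_button s (broken_button s)

-- ===== LEMMAS AND PROOFS =====
-- Invariant: A's arr is the logical string, i.e. the two-stack deque read in the
-- current orientation, and the flip flags coincide.
lemma bb_inv (xl : List Char) :
    ∀ (l r : List Char) (rev flip : Bool),
    xl.foldl bbStepA ((if rev then r.reverse ++ l else l.reverse ++ r), flip)
      = ((if (xl.foldl bbStepB (l, r, rev, flip)).2.2.1
            then (xl.foldl bbStepB (l, r, rev, flip)).2.1.reverse ++ (xl.foldl bbStepB (l, r, rev, flip)).1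
            else (xl.foldl bbStepB (l, r, rev, flip)).1.reverse ++ (xl.foldl bbStepB (l, r, rev, flip)).2.1),
         (xl.foldl bbStepB (l, r, rev, flip)).2.2.2) := by
  induction xl with
  | nil => intro l r rev flip; simp
  | cons c tl ih =>
    intro l r rev flip
    by_cases hc : c = 'i'
    · cases rev
      · simpa [bbStepA, bbStepB, hc] using ih l r false (!flip)
      · simpa [bbStepA, bbStepB, hc] using ih l r true (!flip)
    · cases hf : flip
      · cases rev
        · simpa [bbStepA, bbStepB, hc, List.append_assoc] using ih l (r ++ [c]) false false
        · simpa [bbStepA, bbStepB, hc, List.append_assoc] using ih (l ++ [c]) r true false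
      · cases rev
        · simpa [bbStepA, bbStepB, hc, List.reverse_append] using ih l r true true
        · simpa [bbStepA, bbStepB, hc, List.reverse_append, List.reverse_reverse] using ih l r false true

-- ===== VERDICT (by name: the statement is the Claim_ definition above) =====
theorem broken_button_spec : Claim_equal_broken_button := by
  intro s _
  unfold Spec_broken_button broken_button broken_button_alt
  have h := bb_inv s.toList [] [] false false
  simp only [List.reverse_nil, List.append_nil, if_neg Bool.false_ne_true] at h
  rw [h]
  rcases (s.toList.foldl bbStepB ([], [], false, false)) with ⟨l, r, rev, flip⟩
  cases rev <;> cases flip <;> simp
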